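-- pv_equiv track=rewrite | github.com/fiktor/genftqc | src/genftqc/task_6/generate_codes.py | gen_pauli_string_generators
-- ===== SOURCE A (Python) =====
-- def gen_pauli_string_generators(n):
--     generators = []
--     num_generators = 2*n
--
--     for i in range(n):
--         generator = ''
--         for j in range(n):
--             if i == j:
--                 generator += 'X'
--             else:
--                 generator += 'I'
--
--         generators.append(generator)
--
--     for i in range(n):
--         generator = ''
--         for j in range(n):
--             if i == j:
--                 generator += 'Z'
--             else:
--                 generator += 'I'
--
--         generators.append(generator)
--
--     return generators
-- ===== SOURCE B (Python) =====
-- def gen_pauli_string_generators(n):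
--     return ['I' * i + 'X' + 'I' * (n - i - 1) for i in range(n)] + \
--            ['I' * i + 'Z' + 'I' * (n - i - 1) for i in range(n)]
-- ===== Notes on version B (the rewrite author's own statement) =====
-- stated objective: simpler
-- what changed: Each generator string is built in closed form from its index ('I'*i + pauli + 'I'*(n-i-1)) instead of scanning all n positions with an i==j branch and character-by-character concatenation.
import Mathlib
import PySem

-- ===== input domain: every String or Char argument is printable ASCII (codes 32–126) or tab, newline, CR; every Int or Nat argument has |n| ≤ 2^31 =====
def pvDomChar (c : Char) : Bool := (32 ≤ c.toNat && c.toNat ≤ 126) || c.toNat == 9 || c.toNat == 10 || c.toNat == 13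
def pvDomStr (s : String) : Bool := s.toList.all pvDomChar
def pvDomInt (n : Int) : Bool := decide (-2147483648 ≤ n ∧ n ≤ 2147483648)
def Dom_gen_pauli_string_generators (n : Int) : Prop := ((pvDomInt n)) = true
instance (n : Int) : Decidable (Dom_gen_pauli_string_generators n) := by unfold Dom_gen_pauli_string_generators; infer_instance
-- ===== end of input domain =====

-- B builds each generator string in closed form from its index ('I'*i + pauli + 'I'*(n-i-1))
-- instead of A's inner position scan with an i==j branch; objective: simpler.

-- ===== PORT A =====
-- inner loop of A: generator = ''; for j in range(n): generator += 'X'/'Z' or 'I'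
-- (strings handled on the List Char side per the PySem convention; += is list append)
def pvRowA (n i : Int) (c : Char) : String :=
  String.ofList ((PySem.List.pyRange 0 n 1).foldl
    (fun g j => g ++ (if i = j then [c] else ['I'])) [])

def gen_pauli_string_generators (n : Int) : List String :=
  let gens := (PySem.List.pyRange 0 n 1).foldl (fun gs i => gs ++ [pvRowA n i 'X']) []
  (PySem.List.pyRange 0 n 1).foldl (fun gs i => gs ++ [pvRowA n i 'Z']) gens

-- ===== PORT B =====
-- 'I'*i + c + 'I'*(n-i-1)  (Python repetition clamps negative counts to 0, as .toNat does)
def pvRowB (n i : Int) (c : Char) : String :=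
  String.ofList (List.replicate i.toNat 'I' ++ c :: List.replicate (n - i - 1).toNat 'I')

def gen_pauli_string_generators_alt (n : Int) : List String :=
  (PySem.List.pyRange 0 n 1).map (fun i => pvRowB n i 'X')
    ++ (PySem.List.pyRange 0 n 1).map (fun i => pvRowB n i 'Z')

-- ===== PRECONDITION & SPEC =====
def Spec_gen_pauli_string_generators (n : Int) (out : List String) : Prop := out = gen_pauli_string_generators_alt n
instance (n : Int) (out : List String) : Decidable (Spec_gen_pauli_string_generators n out) := by unfold Spec_gen_pauli_string_generators; infer_instance

-- ===== CLAIM (what is proved, stated in full; the proofs are below) =====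
def Claim_equal_gen_pauli_string_generators : Prop := ∀ (n : Int), Dom_gen_pauli_string_generators n → Spec_gen_pauli_string_generators n (gen_pauli_string_generators n)

-- ===== LEMMAS AND PROOFS =====

-- after the matching position, A's inner loop only appends 'I's
lemma pvRowA_nomatch (c : Char) :
    ∀ (k : Nat) (a n i : Int) (g : List Char), (n - a).toNat = k → i < a →
      (PySem.List.pyRange a n 1).foldl (fun g j => g ++ (if i = j then [c] else ['I'])) g
        = g ++ List.replicate (n - a).toNat 'I' := by
  intro k
  induction k with
  | zero =>
    intro a n i g hk _
    rw [PySem.List.pyRange_one_eq_nil (by omega), hk]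
    simp
  | succ m ih =>
    intro a n i g hk hlt
    rw [PySem.List.pyRange_one_cons (by omega)]
    simp only [List.foldl_cons, if_neg (by omega : ¬ i = a)]
    rw [ih (a + 1) n i _ (by omega) (by omega)]
    have : (n - a).toNat = (n - (a + 1)).toNat + 1 := by omega
    rw [this, List.replicate_succ, List.append_assoc]
    rfl

-- A's inner loop from position a, with the matching position i still ahead
lemma pvRowA_match (c : Char) :
    ∀ (k : Nat) (a n i : Int) (g : List Char), (n - a).toNat = k → a ≤ i → i < n →
      (PySem.List.pyRange a n 1).foldl (fun g j => g ++ (if i = j then [c] else ['I'])) g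
        = g ++ List.replicate (i - a).toNat 'I' ++ c :: List.replicate (n - i - 1).toNat 'I' := by
  intro k
  induction k with
  | zero => intro a n i g hk h1 h2; omega
  | succ m ih =>
    intro a n i g hk h1 h2
    rw [PySem.List.pyRange_one_cons (by omega)]
    simp only [List.foldl_cons]
    by_cases hia : i = a
    · subst hia
      
      rw [pvRowA_nomatch c (n - (i + 1)).toNat (i + 1) n i _ rfl (by omega)]
      have h0 : (i - i).toNat = 0 := by omega
      have h1' : (n - (i + 1)).toNat = (n - i - 1).toNat := by omega
      rw [h0, h1']
      simp
    · simp only [if_neg hia]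
      rw [ih (a + 1) n i _ (by omega) (by omega) h2]
      have : (i - a).toNat = (i - (a + 1)).toNat + 1 := by omega
      simp [this, List.replicate_succ]

lemma pvRow_eq (n i : Int) (c : Char) (h0 : 0 ≤ i) (h1 : i < n) :
    pvRowA n i c = pvRowB n i c := by
  unfold pvRowA pvRowB
  rw [pvRowA_match c (n - 0).toNat 0 n i [] rfl h0 h1]
  have : (i - 0).toNat = i.toNat := by omega
  simp

lemma pvBlock_eq (n : Int) (c : Char) :
    (PySem.List.pyRange 0 n 1).map (fun i => pvRowA n i c)
      = (PySem.List.pyRange 0 n 1).map (fun i => pvRowB n i c) := by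
  apply List.map_congr_left
  intro i hi
  rw [PySem.List.mem_pyRange_one] at hi
  exact pvRow_eq n i c hi.1 hi.2

-- ===== VERDICT (by name: the statement is the Claim_ definition above) =====
theorem gen_pauli_string_generators_spec : Claim_equal_gen_pauli_string_generators := by
  intro n _
  unfold Spec_gen_pauli_string_generators gen_pauli_string_generators gen_pauli_string_generators_alt
  simp only [PySem.List.foldl_append_singleton_eq_map, List.nil_append]
  rw [pvBlock_eq n 'X', pvBlock_eq n 'Z']
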